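-- pv_equiv track=rewrite | github.com/kr8tiv-ai/kr8tiv-mission-control | scripts/ci/rollout_gate_ops.py | parse_health_urls
-- ===== SOURCE A (Python) =====
-- def parse_health_urls(raw_values: list[str]) -> tuple[str, ...]:
--     """Normalize comma/newline separated URLs and validate protocols."""
--     urls: list[str] = []
--     seen: set[str] = set()
--     for raw in raw_values:
--         for chunk in raw.split(","):
--             value = chunk.strip()
--             if not value:
--                 continue
--             if not (value.startswith("http://") or value.startswith("https://")):
--                 raise ValueError(f"Health URL must use http/https: {value}")
--             if value in seen:
--                 continue
--             seen.add(value)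
--             urls.append(value)
--     if not urls:
--         raise ValueError("At least one health URL is required.")
--     return tuple(urls)
-- ===== SOURCE B (Python) =====
-- def _merge(rest: list[str]) -> list[str]:
--     """Recursively merge: dedup the first raw value's URLs locally, then
--     append the tail's merged URLs that the head does not already contain."""
--     if not rest:
--         return []
--     head: list[str] = []
--     for chunk in rest[0].split(","):
--         v = chunk.strip()
--         if not v:
--             continue
--         if not v.startswith(("http://", "https://")):
--             raise ValueError(f"Health URL must use http/https: {v}")
--         if v not in head:
--             head.append(v)
--     return head + [u for u in _merge(rest[1:]) if u not in head]
--
-- def parse_health_urls(raw_values: list[str]) -> tuple[str, ...]: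
--     """Normalize comma/newline separated URLs and validate protocols."""
--     urls = _merge(raw_values)
--     if not urls:
--         raise ValueError("At least one health URL is required.")
--     return tuple(urls)
-- ===== Notes on version B (the rewrite author's own statement) =====
-- stated objective: alternative
-- what changed: A's single global pass with a mutable seen-set is replaced by structural recursion on raw_values: each head raw value is deduped locally into a list, and the recursively merged tail is filtered against the head before concatenation (no global seen state).
import Mathlib
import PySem

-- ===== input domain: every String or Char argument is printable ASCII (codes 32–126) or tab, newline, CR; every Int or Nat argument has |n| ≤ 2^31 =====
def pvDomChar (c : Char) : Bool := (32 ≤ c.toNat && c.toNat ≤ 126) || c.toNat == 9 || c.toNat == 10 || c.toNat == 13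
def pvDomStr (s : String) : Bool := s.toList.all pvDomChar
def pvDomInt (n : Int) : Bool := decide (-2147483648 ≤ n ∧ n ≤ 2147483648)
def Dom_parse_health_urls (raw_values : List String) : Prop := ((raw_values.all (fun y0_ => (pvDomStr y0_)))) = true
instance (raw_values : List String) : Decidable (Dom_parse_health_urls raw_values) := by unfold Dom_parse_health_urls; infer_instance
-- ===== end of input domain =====

-- B replaces A's single global pass with a mutable seen-set by structural recursion on
-- raw_values: dedup the head raw value locally, then filter the recursively merged tail
-- against it. Equivalence is about the RETURN value; both raise ValueError on the same
-- inputs (excluded by Pre_).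

-- ===== PORT A =====
def phuValid (v : String) : Bool :=
  PySem.Str.startswith v "http://" || PySem.Str.startswith v "https://"

-- inner loop step of A over one chunk; state = (urls, seen).
-- A raises on an invalid chunk (excluded by Pre_); the port skips it there.
def phuStepA (st : List String × PySem.Set String) (chunk : String) :
    List String × PySem.Set String :=
  let value := PySem.Str.strip chunk
  if value = "" then st
  else if ¬ phuValid value then st   -- Python: raise ValueError (outside Pre_)
  else if st.2.contains value then st
  else (st.1 ++ [value], st.2.add value)

def parse_health_urls (raw_values : List String) : List String :=
  let st := raw_values.foldl
    (fun st raw => (((PySem.Str.split? raw ",").getD [])).foldl phuStepA st)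
    ([], PySem.Set.empty)
  st.1   -- 'if not urls: raise' is outside Pre_

-- ===== PORT B =====
-- dedup of the head raw value's stripped non-empty chunks (invalid chunk: raise, outside Pre_)
def phuHead (raw : String) : List String :=
  (((PySem.Str.split? raw ",").getD [])).foldl (fun head chunk =>
    let v := PySem.Str.strip chunk
    if v = "" then head
    else if ¬ phuValid v then head   -- Python: raise ValueError (outside Pre_)
    else if head.contains v then head
    else head ++ [v]) []

def phuMerge : List String → List String
  | [] => []
  | r :: rs => phuHead r ++ (phuMerge rs).filter (fun u => !(phuHead r).contains u)

def parse_health_urls_alt (raw_values : List String) : List String :=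
  -- the emptiness check only raises (outside Pre_)
  phuMerge raw_values

-- ===== PRECONDITION & SPEC =====
-- all stripped non-empty chunks, in order (used only to state Pre_ and in the proofs)
def phuChunks (raw_values : List String) : List String :=
  raw_values.flatMap
    (fun raw => ((((PySem.Str.split? raw ",").getD [])).map PySem.Str.strip).filter (fun v => !(v == "")))

-- Pre_ excludes exactly the inputs where A raises ValueError: some stripped non-empty
-- chunk lacks an http/https prefix, or there are no non-empty chunks at all.
def Pre_parse_health_urls (raw_values : List String) : Prop :=
  phuChunks raw_values ≠ [] ∧ ∀ v ∈ phuChunks raw_values, phuValid v = true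
instance (raw_values : List String) : Decidable (Pre_parse_health_urls raw_values) := by
  unfold Pre_parse_health_urls; infer_instance
def pvWitness_parse_health_urls : List String := ["http://a, https://b", "https://b"]

def Spec_parse_health_urls (raw_values : List String) (out : List String) : Prop :=
  out = parse_health_urls_alt raw_values
instance (raw_values : List String) (out : List String) :
    Decidable (Spec_parse_health_urls raw_values out) := by
  unfold Spec_parse_health_urls; infer_instance

-- ===== CLAIM (what is proved, stated in full; the proofs are below) =====
def Claim_equal_parse_health_urls : Prop := ∀ (raw_values : List String), Dom_parse_health_urls raw_values → Pre_parse_health_urls raw_values → Spec_parse_health_urls raw_values (parse_health_urls raw_values)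

-- ===== LEMMAS AND PROOFS =====

-- A's inner loop over valid chunks keeps urls = seen and acts like Set.add on the
-- stripped non-empty chunks.
lemma phu_inner (chunks : List String) (s : List String)
    (h : ∀ c ∈ chunks, PySem.Str.strip c ≠ "" → phuValid (PySem.Str.strip c) = true) :
    chunks.foldl phuStepA (s, s) =
      (((chunks.map PySem.Str.strip).filter (fun v => !(v == ""))).foldl PySem.Set.add s,
       ((chunks.map PySem.Str.strip).filter (fun v => !(v == ""))).foldl PySem.Set.add s) := by
  induction chunks generalizing s with
  | nil => simp
  | cons c cs ih =>
    have hv := h c (by simp)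
    simp only [List.foldl_cons, List.map_cons, List.filter_cons]
    by_cases he : PySem.Str.strip c = ""
    · simp [phuStepA, he, ih _ (fun x hx => h x (by simp [hx]))]
    · have hval := hv he
      have hstep : phuStepA (s, s) c = (PySem.Set.add s (PySem.Str.strip c),
          PySem.Set.add s (PySem.Str.strip c)) := by
        simp only [phuStepA, hval]
        by_cases hm : PySem.Str.strip c ∈ s <;>
          simp [he, hm, PySem.Set.add, PySem.Set.contains]
      simp only [hstep]
      have : (!(PySem.Str.strip c == "")) = true := by simp [he]
      rw [this]
      simpa using ih _ (fun x hx => h x (by simp [hx]))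

-- A's outer loop = Set.add folded over all stripped non-empty chunks.
lemma phu_outer (raws : List String) (s : List String)
    (h : ∀ v ∈ phuChunks raws, phuValid v = true) :
    raws.foldl (fun st raw => (((PySem.Str.split? raw ",").getD [])).foldl phuStepA st) (s, s) =
      ((phuChunks raws).foldl PySem.Set.add s, (phuChunks raws).foldl PySem.Set.add s) := by
  induction raws generalizing s with
  | nil => simp [phuChunks]
  | cons r rs ih =>
    simp only [List.foldl_cons]
    have hr : ∀ c ∈ ((PySem.Str.split? r ",").getD []), PySem.Str.strip c ≠ "" →
        phuValid (PySem.Str.strip c) = true := by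
      intro c hc hne
      apply h
      simp only [phuChunks, List.flatMap_cons]
      refine List.mem_append_left _ ?_
      simp only [List.mem_filter, List.mem_map]
      exact ⟨⟨c, hc, rfl⟩, by simp [hne]⟩
    rw [phu_inner _ _ hr]
    have hrs : ∀ v ∈ phuChunks rs, phuValid v = true := by
      intro v hv; apply h
      simp only [phuChunks, List.flatMap_cons] at hv ⊢
      exact List.mem_append_right _ hv
    rw [ih _ hrs]
    simp [phuChunks, List.foldl_append]

-- folding Set.add from an arbitrary start s = s ++ (the fresh elements, deduped).
lemma phu_add_from (ys : List String) (s : List String) :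
    ys.foldl PySem.Set.add s =
      s ++ (ys.foldl PySem.Set.add []).filter (fun u => !s.contains u) := by
  induction ys generalizing s with
  | nil => simp
  | cons y ys ih =>
    simp only [List.foldl_cons]
    have h0 : PySem.Set.add ([] : List String) y = [y] := by
      simp [PySem.Set.add, PySem.Set.contains]
    rw [ih (PySem.Set.add s y), h0, ih [y]]
    by_cases hy : y ∈ s
    · have hadd : PySem.Set.add s y = s := by simp [PySem.Set.add, PySem.Set.contains, hy]
      rw [hadd]
      simp only [List.append_cancel_left_eq, List.filter_append, List.filter_filter]
      have h1 : List.filter (fun u => !s.contains u) [y] = [] := by simp [hy]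
      rw [h1, List.nil_append]
      apply List.filter_congr
      intro x _
      by_cases hxy : x = y
      · subst hxy; simp [hy]
      · simp [hxy]
    · have hadd : PySem.Set.add s y = s ++ [y] := by
        simp [PySem.Set.add, PySem.Set.contains, hy]
      rw [hadd]
      simp only [List.filter_append, List.filter_filter, List.append_assoc]
      have h1 : List.filter (fun u => !s.contains u) [y] = [y] := by simp [hy]
      rw [h1]
      refine congrArg (fun t => s ++ ([y] ++ t)) ?_
      apply List.filter_congr
      intro x _
      by_cases hxy : x = y
      · subst hxy; simp
      · simp [hxy]

-- the head-dedup of B = Set.add folded over the head's stripped non-empty chunks, if valid.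
lemma phu_head (r : String)
    (h : ∀ c ∈ ((PySem.Str.split? r ",").getD []), PySem.Str.strip c ≠ "" →
        phuValid (PySem.Str.strip c) = true) :
    phuHead r =
      ((((PySem.Str.split? r ",").getD []).map PySem.Str.strip).filter
        (fun v => !(v == ""))).foldl PySem.Set.add [] := by
  unfold phuHead
  generalize hcs : ((PySem.Str.split? r ",").getD []) = cs
  rw [hcs] at h
  suffices H : ∀ (cs : List String) (acc : List String),
      (∀ c ∈ cs, PySem.Str.strip c ≠ "" → phuValid (PySem.Str.strip c) = true) →
      cs.foldl (fun head chunk =>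
        let v := PySem.Str.strip chunk
        if v = "" then head
        else if ¬ phuValid v then head
        else if head.contains v then head
        else head ++ [v]) acc =
      ((cs.map PySem.Str.strip).filter (fun v => !(v == ""))).foldl PySem.Set.add acc by
    exact H cs [] h
  intro cs
  induction cs with
  | nil => intro acc _; simp
  | cons c cs ih =>
    intro acc h
    have hv := h c (by simp)
    by_cases he : PySem.Str.strip c = ""
    · simp only [List.foldl_cons, List.map_cons, List.filter_cons]
      simpa [he] using ih acc (fun x hx => h x (by simp [hx]))
    · have hval := hv he
      have hb : (!(PySem.Str.strip c == "")) = true := by simp [he]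
      have hstep : (fun head chunk =>
          let v := PySem.Str.strip chunk
          if v = "" then head
          else if ¬ phuValid v then head
          else if head.contains v then head
          else head ++ [v]) acc c = PySem.Set.add acc (PySem.Str.strip c) := by
        simp [he, hval, PySem.Set.add, PySem.Set.contains]
      simp only [List.foldl_cons, List.map_cons, List.filter_cons, hb, if_true, hstep]
      exact ih _ (fun x hx => h x (by simp [hx]))

-- Set.add over all chunks = B's recursive merge, if all chunks valid.
lemma phu_merge (raws : List String)
    (h : ∀ v ∈ phuChunks raws, phuValid v = true) :
    (phuChunks raws).foldl PySem.Set.add [] = phuMerge raws := by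
  induction raws with
  | nil => simp [phuChunks, phuMerge]
  | cons r rs ih =>
    have hr : ∀ c ∈ ((PySem.Str.split? r ",").getD []), PySem.Str.strip c ≠ "" →
        phuValid (PySem.Str.strip c) = true := by
      intro c hc hne
      apply h
      simp only [phuChunks, List.flatMap_cons]
      refine List.mem_append_left _ ?_
      simp only [List.mem_filter, List.mem_map]
      exact ⟨⟨c, hc, rfl⟩, by simp [hne]⟩
    have hrs : ∀ v ∈ phuChunks rs, phuValid v = true := by
      intro v hv; apply h
      simp only [phuChunks, List.flatMap_cons] at hv ⊢
      exact List.mem_append_right _ hv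
    have hch : phuChunks (r :: rs) =
        ((((PySem.Str.split? r ",").getD []).map PySem.Str.strip).filter
          (fun v => !(v == ""))) ++ phuChunks rs := by
      simp [phuChunks]
    rw [hch, List.foldl_append, ← phu_head r hr, phu_add_from, phuMerge, ih hrs]

-- ===== VERDICT (by name: the statement is the Claim_ definition above) =====
theorem parse_health_urls_spec : Claim_equal_parse_health_urls := by
  intro raw_values _ hpre
  unfold Spec_parse_health_urls parse_health_urls parse_health_urls_alt
  have := phu_outer raw_values [] hpre.2
  simp only [PySem.Set.empty] at *
  rw [this]
  exact phu_merge raw_values hpre.2
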